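-- pv_equiv track=rewrite | github.com/SOPT-all/36-STUDY-WEB-ALGOS | ShinJisu/week1/1083_소트.py | find_largest_order
-- ===== SOURCE A (Python) =====
-- def find_largest_order(nums, swap_limit):
--     n = len(nums)
--     result = nums.copy()
--     swaps_left = swap_limit
--
--     pos = 0
--     while pos < n and swaps_left > 0:
--         # 현재 위치부터 교환 가능한 범위 내에서 최대값 찾기
--         max_idx = pos
--         # 현재 위치에서 남은 교환 횟수만큼 확인
--         max_range = min(n-1, pos + swaps_left)
--
--         for i in range(pos, max_range + 1):
--             if result[i] > result[max_idx]:
--                 max_idx = i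
--
--         # 최대값을 현재 위치로 이동 (버블 정렬 방식)
--         for i in range(max_idx, pos, -1):
--             result[i], result[i-1] = result[i-1], result[i]
--             swaps_left -= 1
--
--         pos += 1
--
--     return result
-- ===== SOURCE B (Python) =====
-- def find_largest_order(nums, swap_limit):
--     # Consume the list front-to-back: pick the first maximum of the reachable
--     # window, emit it, delete it, and pay its distance in swaps.
--     out = []
--     rest = list(nums)
--     k = swap_limit
--     while rest and k > 0:
--         window = rest[:k + 1]
--         j = window.index(max(window))
--         out.append(rest[j])
--         del rest[j]
--         k -= j
--     return out + rest
-- ===== Notes on version B (the rewrite author's own statement) =====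
-- stated objective: simpler
-- what changed: A keeps one fixed-size array and moves each chosen maximum to its place with an inner bubble-swap loop over absolute indices; B instead consumes the list front-to-back, picking the first maximum of the reachable window with max()/index(), deleting it and paying its distance in swaps, so the swap loop and absolute-index bookkeeping disappear.
import Mathlib
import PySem

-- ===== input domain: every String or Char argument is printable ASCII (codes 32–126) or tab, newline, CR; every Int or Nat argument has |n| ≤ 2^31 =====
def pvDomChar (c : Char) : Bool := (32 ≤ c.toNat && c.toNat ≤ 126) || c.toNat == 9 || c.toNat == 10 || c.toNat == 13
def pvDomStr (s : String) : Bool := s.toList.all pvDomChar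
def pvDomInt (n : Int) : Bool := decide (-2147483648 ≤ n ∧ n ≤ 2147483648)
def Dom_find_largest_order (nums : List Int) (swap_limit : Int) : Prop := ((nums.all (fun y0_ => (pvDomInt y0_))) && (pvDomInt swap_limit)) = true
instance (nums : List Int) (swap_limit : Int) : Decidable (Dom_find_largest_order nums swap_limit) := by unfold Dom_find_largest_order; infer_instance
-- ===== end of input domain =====

-- B replaces A's bubble-swap inner loop and absolute-index bookkeeping by consuming the
-- list front-to-back (first max of the reachable window is emitted and deleted); same values, simpler shape.

-- ===== PORT A =====
-- result[i], result[i-1] = result[i-1], result[i]  (indices always in range here)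
def pvSwapAdj (res : List Int) (i : Nat) : List Int :=
  (res.set i (res.getD (i - 1) 0)).set (i - 1) (res.getD i 0)

-- for i in range(max_idx, pos, -1): swap; swaps_left -= 1
def pvBubble (res : List Int) (i pos : Nat) (swapsLeft : Int) : List Int × Int :=
  if pos < i then pvBubble (pvSwapAdj res i) (i - 1) pos (swapsLeft - 1) else (res, swapsLeft)
termination_by i

-- for i in range(pos, max_range + 1): if result[i] > result[max_idx]: max_idx = i
-- (indices in range; List.range' pos c is exactly range(pos, pos + c))
def pvFindMax (res : List Int) (maxIdx : Nat) (idxs : List Nat) : Nat :=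
  idxs.foldl (fun acc i => if res.getD i 0 > res.getD acc 0 then i else acc) maxIdx

-- the while loop (pos increases, so n - pos decreases)
def pvWhile (n : Nat) (res : List Int) (swapsLeft : Int) (pos : Nat) : List Int :=
  if _h : pos < n ∧ 0 < swapsLeft then
    let maxRange : Int := min ((n : Int) - 1) ((pos : Int) + swapsLeft)
    let maxIdx := pvFindMax res pos (List.range' pos (maxRange.toNat + 1 - pos))
    let p := pvBubble res maxIdx pos swapsLeft
    pvWhile n p.1 p.2 (pos + 1)
  else res
termination_by n - pos
decreasing_by omega

def find_largest_order (nums : List Int) (swap_limit : Int) : List Int :=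
  pvWhile nums.length nums swap_limit 0

-- ===== PORT B =====
-- j = window.index(max(window)) is < rest.length (needed for termination)
theorem pvAltIdxLt (rest : List Int) (k : Nat) (h : rest ≠ []) :
    ((PySem.List.index? (rest.take (k + 1))
        ((PySem.List.max? (rest.take (k + 1)) (fun y => y)).getD 0)).getD 0) < rest.length := by
  cases hidx : PySem.List.index? (rest.take (k + 1))
      ((PySem.List.max? (rest.take (k + 1)) (fun y => y)).getD 0) with
  | none => cases rest with | nil => simp at h | cons a t => simp
  | some j =>
      obtain ⟨hk, -, -⟩ := PySem.List.getElem_of_index?_eq_some hidx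
      have h2 : (rest.take (k + 1)).length = min (k + 1) rest.length := List.length_take
      simp only [Option.getD_some]
      omega

-- while rest and k > 0: window = rest[:k+1]; j = window.index(max(window));
--   out.append(rest[j]); del rest[j]; k -= j
-- (rest[:k+1] = rest.take (k.toNat+1) since k+1 > 0; max/index exist since window ≠ [])
def pvAltGo (out rest : List Int) (k : Int) : List Int :=
  if h : rest ≠ [] ∧ 0 < k then
    let window := rest.take (k.toNat + 1)
    let m := (PySem.List.max? window (fun y => y)).getD 0
    let j := (PySem.List.index? window m).getD 0
    pvAltGo (out ++ [rest.getD j 0]) (rest.eraseIdx j) (k - (j : Int))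
  else out ++ rest
termination_by rest.length
decreasing_by
  have h1 := pvAltIdxLt rest k.toNat h.1
  simp only [List.length_eraseIdx, if_pos h1]
  omega

def find_largest_order_alt (nums : List Int) (swap_limit : Int) : List Int :=
  pvAltGo [] nums swap_limit

-- ===== PRECONDITION & SPEC =====
def Spec_find_largest_order (nums : List Int) (swap_limit : Int) (out : List Int) : Prop := out = find_largest_order_alt nums swap_limit
instance (nums : List Int) (swap_limit : Int) (out : List Int) : Decidable (Spec_find_largest_order nums swap_limit out) := by unfold Spec_find_largest_order; infer_instance

-- ===== CLAIM (what is proved, stated in full; the proofs are below) =====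
def Claim_equal_find_largest_order : Prop := ∀ (nums : List Int) (swap_limit : Int), Dom_find_largest_order nums swap_limit → Spec_find_largest_order nums swap_limit (find_largest_order nums swap_limit)

-- ===== LEMMAS AND PROOFS =====

-- the accumulator of pvAltGo only prefixes the result
theorem pvAltGo_acc2 (n : Nat) : ∀ (rest a b : List Int) (k : Int), rest.length ≤ n →
    pvAltGo (a ++ b) rest k = a ++ pvAltGo b rest k := by
  induction n with
  | zero =>
      intro rest a b k hn
      have : rest = [] := List.eq_nil_of_length_eq_zero (by omega)
      subst this
      conv_lhs => rw [pvAltGo]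
      conv_rhs => rw [pvAltGo]
      simp
  | succ n ih =>
      intro rest a b k hn
      conv_lhs => rw [pvAltGo]
      conv_rhs => rw [pvAltGo]
      by_cases h : rest ≠ [] ∧ 0 < k
      · simp only [dif_pos h]
        have hlt := pvAltIdxLt rest k.toNat h.1
        have hlen : (rest.eraseIdx ((PySem.List.index? (rest.take (k.toNat + 1))
            ((PySem.List.max? (rest.take (k.toNat + 1)) (fun y => y)).getD 0)).getD 0)).length ≤ n := by
          simp only [List.length_eraseIdx, if_pos hlt]; omega
        rw [List.append_assoc, ih _ _ _ _ hlen]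
      · simp [dif_neg h]

-- the accumulator of pvAltGo only prefixes the result
theorem pvAltGo_acc (n : Nat) (rest out : List Int) (k : Int) (hn : rest.length ≤ n) :
    pvAltGo out rest k = out ++ pvAltGo [] rest k := by
  have := pvAltGo_acc2 n rest out [] k hn
  simpa using this

-- first-argmax invariant of the running-max index fold
theorem pvArg_inv (w : List Int) : ∀ n, 1 ≤ n → n ≤ w.length →
    pvFindMax w 0 (List.range n) < n ∧
    (∀ i, i < n → w.getD i 0 ≤ w.getD (pvFindMax w 0 (List.range n)) 0) ∧
    (∀ i, i < pvFindMax w 0 (List.range n) → w.getD i 0 < w.getD (pvFindMax w 0 (List.range n)) 0) := by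
  intro n
  induction n with
  | zero => omega
  | succ n ih =>
      intro _ hle
      by_cases hn : n = 0
      · subst hn
        simp [pvFindMax, List.range_succ]
      · obtain ⟨ha, hmax, hstrict⟩ := ih (by omega) (by omega)
        set a := pvFindMax w 0 (List.range n) with hadef
        have hstep : pvFindMax w 0 (List.range (n + 1)) =
            if w.getD n 0 > w.getD a 0 then n else a := by
          conv_lhs => rw [pvFindMax, List.range_succ, List.foldl_append,
            List.foldl_cons, List.foldl_nil]
          rw [hadef, pvFindMax]
        rw [hstep]
        split_ifs with hgt
        · refine ⟨by omega, ?_, ?_⟩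
          · intro i hi
            rcases Nat.lt_succ_iff_lt_or_eq.mp hi with h1 | h1
            · exact le_of_lt (lt_of_le_of_lt (hmax i h1) hgt)
            · simp [h1]
          · intro i hi
            exact lt_of_le_of_lt (hmax i hi) hgt
        · refine ⟨by omega, ?_, hstrict⟩
          intro i hi
          rcases Nat.lt_succ_iff_lt_or_eq.mp hi with h1 | h1
          · exact hmax i h1
          · subst h1; omega

-- the fold's result is exactly window.index(max(window))
theorem pvArg_index (w : List Int) (hw : w ≠ []) :
    PySem.List.index? w ((PySem.List.max? w (fun y => y)).getD 0) =
      some (pvFindMax w 0 (List.range w.length)) := by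
  obtain ⟨ha, hmax, hstrict⟩ := pvArg_inv w w.length (by
    cases w with | nil => exact absurd rfl hw | cons x t => simp) le_rfl
  set a := pvFindMax w 0 (List.range w.length) with hadef
  obtain ⟨m, hm⟩ : ∃ m, PySem.List.max? w (fun y => y) = some m := by
    cases hm : PySem.List.max? w (fun y => y) with
    | none => exact absurd ((PySem.List.max?_eq_none_iff w _).mp hm) hw
    | some m => exact ⟨m, rfl⟩
  have hmem := PySem.List.max?_mem hm
  have hisMax := PySem.List.max?_isMax hm
  have hwa : w.getD a 0 = m := by
    have h1 : w.getD a 0 ≤ m := by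
      have := hisMax (w.getD a 0) (by
        rw [List.getD_eq_getElem w 0 ha]; exact List.getElem_mem ha)
      simpa using this
    have h2 : m ≤ w.getD a 0 := by
      obtain ⟨i, hi, hEq⟩ := List.getElem_of_mem hmem
      have := hmax i hi
      rw [List.getD_eq_getElem w 0 hi, hEq] at this
      exact this
    omega
  rw [hm]
  simp only [Option.getD_some]
  rw [PySem.List.index?_eq_some_iff]
  refine ⟨w.take a, w.drop (a + 1), ?_, ?_, ?_⟩
  · conv_lhs => rw [← List.take_append_drop a w]
    rw [List.drop_eq_getElem_cons ha, ← List.getD_eq_getElem w 0 ha, hwa]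
  · simp [List.length_take]; omega
  · intro hmemtake
    obtain ⟨i, hi, hEq⟩ := List.getElem_of_mem hmemtake
    have hia : i < a := by have := List.length_take (i := a) (l := w); omega
    rw [List.getElem_take] at hEq
    have := hstrict i hia
    rw [List.getD_eq_getElem w 0 (by omega)] at this
    omega

-- index-shift: the max scan over done ++ rest at offset d is the scan over rest
theorem pvFindMax_shift (done rest : List Int) :
    ∀ (idxs : List Nat) (a : Nat),
      pvFindMax (done ++ rest) (done.length + a) (idxs.map (fun i => done.length + i)) =
        done.length + pvFindMax rest a idxs := by
  intro idxs
  induction idxs with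
  | nil => intro a; simp [pvFindMax]
  | cons i t ih =>
      intro a
      have h1 : (done ++ rest).getD (done.length + i) 0 = rest.getD i 0 := by
        rw [List.getD_append_right _ _ _ _ (by omega)]
        congr 1
        omega
      have h2 : (done ++ rest).getD (done.length + a) 0 = rest.getD a 0 := by
        rw [List.getD_append_right _ _ _ _ (by omega)]
        congr 1
        omega
      simp only [List.map_cons, pvFindMax, List.foldl_cons, h1, h2]
      split_ifs with hgt
      · exact ih i
      · exact ih a

-- the scan over indices < c sees only rest.take c
theorem pvFindMax_take (rest : List Int) (c : Nat) :
    ∀ (idxs : List Nat) (a : Nat), (∀ i ∈ idxs, i < c) → a < c →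
      pvFindMax rest a idxs = pvFindMax (rest.take c) a idxs := by
  intro idxs
  induction idxs with
  | nil => intro a _ _; simp [pvFindMax]
  | cons i t ih =>
      intro a hmem ha
      have hi : i < c := hmem i (List.mem_cons_self ..)
      have hgetD : ∀ j, j < c → rest.getD j 0 = (rest.take c).getD j 0 := by
        intro j hj
        by_cases hjl : j < rest.length
        · rw [List.getD_eq_getElem _ _ hjl,
            List.getD_eq_getElem _ _ (by rw [List.length_take]; omega), List.getElem_take]
        · rw [List.getD_eq_default _ _ (by omega),
            List.getD_eq_default _ _ (by rw [List.length_take]; omega)]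
      simp only [pvFindMax, List.foldl_cons, hgetD i hi, hgetD a ha]
      split_ifs with hgt
      · exact ih i (fun j hj => hmem j (List.mem_cons_of_mem _ hj)) hi
      · exact ih a (fun j hj => hmem j (List.mem_cons_of_mem _ hj)) ha

-- an adjacent swap inside the suffix commutes with the prefix
theorem pvSwapAdj_append (done rest : List Int) (i : Nat) (hi : 1 ≤ i) :
    pvSwapAdj (done ++ rest) (done.length + i) = done ++ pvSwapAdj rest i := by
  unfold pvSwapAdj
  have e1 : done.length + i - 1 = done.length + (i - 1) := by omega
  rw [e1, List.getD_append_right _ _ _ _ (by omega), List.getD_append_right _ _ _ _ (by omega),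
    List.set_append_right _ _ (by omega), List.set_append_right _ _ (by omega)]
  simp only [Nat.add_sub_cancel_left]

-- swap length is preserved
theorem pvSwapAdj_length (rest : List Int) (i : Nat) :
    (pvSwapAdj rest i).length = rest.length := by
  simp [pvSwapAdj]

-- the bubble loop moves element i of the suffix to its front
theorem pvBubble_spec (done : List Int) :
    ∀ (i : Nat) (rest : List Int) (k : Int), i < rest.length →
      pvBubble (done ++ rest) (done.length + i) done.length k =
        (done ++ rest.getD i 0 :: rest.eraseIdx i, k - (i : Int)) := by
  intro i
  induction i with
  | zero =>
      intro rest k hi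
      rw [pvBubble, if_neg (by omega)]
      cases rest with
      | nil => simp at hi
      | cons x t => simp
  | succ i ih =>
      intro rest k hi
      rw [pvBubble, if_pos (by omega)]
      rw [show done.length + (i + 1) - 1 = done.length + i by omega]
      rw [pvSwapAdj_append done rest (i + 1) (by omega)]
      have hlen : i < (pvSwapAdj rest (i + 1)).length := by
        rw [pvSwapAdj_length]; omega
      rw [ih (pvSwapAdj rest (i + 1)) (k - 1) hlen]
      have hget : (pvSwapAdj rest (i + 1)).getD i 0 = rest.getD (i + 1) 0 := by
        rw [List.getD_eq_getElem _ _ hlen, List.getD_eq_getElem _ _ hi]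
        unfold pvSwapAdj
        rw [List.getElem_set, if_pos (by omega)]
        rw [List.getD_eq_getElem _ _ (by omega)]
      have herase : (pvSwapAdj rest (i + 1)).eraseIdx i = rest.eraseIdx (i + 1) := by
        have hl : (pvSwapAdj rest (i + 1)).length = rest.length := pvSwapAdj_length rest (i + 1)
        have hle1 : ((pvSwapAdj rest (i + 1)).eraseIdx i).length = rest.length - 1 := by
          rw [List.length_eraseIdx, if_pos (by omega), hl]
        have hle2 : (rest.eraseIdx (i + 1)).length = rest.length - 1 := by
          rw [List.length_eraseIdx, if_pos (by omega)]
        apply List.ext_getElem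
        · rw [hle1, hle2]
        · intro j hj1 hj2
          have hjr : j < rest.length - 1 := by rw [hle1] at hj1; exact hj1
          simp only [List.getElem_eraseIdx]
          by_cases hji : j < i
          · rw [dif_pos hji, dif_pos (by omega : j < i + 1)]
            unfold pvSwapAdj
            rw [List.getElem_set, if_neg (by omega), List.getElem_set, if_neg (by omega)]
          · by_cases hji2 : j = i
            · rw [dif_neg hji, dif_pos (by omega : j < i + 1)]
              subst hji2
              unfold pvSwapAdj
              rw [List.getElem_set, if_neg (by omega), List.getElem_set, if_pos rfl]
              have hjj : j + 1 - 1 = j := by omega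
              rw [hjj, List.getD_eq_getElem _ _ (by omega)]
            · rw [dif_neg hji, dif_neg (by omega : ¬ j < i + 1)]
              unfold pvSwapAdj
              rw [List.getElem_set, if_neg (by omega), List.getElem_set, if_neg (by omega)]
      rw [hget, herase]
      have : k - 1 - (i : Int) = k - ((i : Nat) + 1 : Int) := by ring
      rw [this]
      norm_num
-- one unfolding step of each loop (zeta-reduced form of the equation lemma)
theorem pvWhile_step (n : Nat) (res : List Int) (swapsLeft : Int) (pos : Nat)
    (h : pos < n ∧ 0 < swapsLeft) :
    pvWhile n res swapsLeft pos =
      pvWhile n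
        (pvBubble res (pvFindMax res pos (List.range' pos
          ((min ((n : Int) - 1) ((pos : Int) + swapsLeft)).toNat + 1 - pos))) pos swapsLeft).1
        (pvBubble res (pvFindMax res pos (List.range' pos
          ((min ((n : Int) - 1) ((pos : Int) + swapsLeft)).toNat + 1 - pos))) pos swapsLeft).2
        (pos + 1) := by
  rw [pvWhile, dif_pos h]

theorem pvAltGo_step (out rest : List Int) (k : Int) (h : rest ≠ [] ∧ 0 < k) :
    pvAltGo out rest k =
      pvAltGo
        (out ++ [rest.getD ((PySem.List.index? (rest.take (k.toNat + 1))
          ((PySem.List.max? (rest.take (k.toNat + 1)) (fun y => y)).getD 0)).getD 0) 0])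
        (rest.eraseIdx ((PySem.List.index? (rest.take (k.toNat + 1))
          ((PySem.List.max? (rest.take (k.toNat + 1)) (fun y => y)).getD 0)).getD 0))
        (k - (((PySem.List.index? (rest.take (k.toNat + 1))
          ((PySem.List.max? (rest.take (k.toNat + 1)) (fun y => y)).getD 0)).getD 0 : Nat) : Int)) := by
  rw [pvAltGo, dif_pos h]

-- main loop correspondence: A's while loop on done ++ rest equals done ++ B's loop on rest
theorem pvMain (n : Nat) : ∀ (rest done : List Int) (k : Int), rest.length ≤ n →
    pvWhile (done.length + rest.length) (done ++ rest) k done.length =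
      done ++ pvAltGo [] rest k := by
  induction n with
  | zero =>
      intro rest done k hn
      have : rest = [] := List.eq_nil_of_length_eq_zero (by omega)
      subst this
      rw [pvWhile, pvAltGo]
      simp
  | succ n ih =>
      intro rest done k hn
      by_cases hrest : rest = []
      · subst hrest
        rw [pvWhile, pvAltGo]
        simp
      by_cases hk : 0 < k
      swap
      · rw [pvWhile, pvAltGo]
        rw [dif_neg (fun hcon => hk hcon.2), dif_neg (fun hcon => hk hcon.2)]
        simp
      -- the real step
      have hL : 0 < rest.length := List.length_pos_iff.mpr hrest
      set w := rest.take (k.toNat + 1) with hw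
      have hwlen : w.length = min (k.toNat + 1) rest.length := by rw [hw, List.length_take]
      have hwpos : 0 < w.length := by omega
      have hwne : w ≠ [] := List.length_pos_iff.mp hwpos
      obtain ⟨ha, -, -⟩ := pvArg_inv w w.length (by omega) le_rfl
      set a := pvFindMax w 0 (List.range w.length) with hadef
      have hindex := pvArg_index w hwne
      rw [← hadef] at hindex
      have hblt : a < rest.length := by omega
      have herlen : (rest.eraseIdx a).length = rest.length - 1 := by
        rw [List.length_eraseIdx, if_pos hblt]
      -- unfold one step of A's loop
      rw [pvWhile_step _ _ _ _ (by constructor <;> omega : done.length < done.length + rest.length ∧ 0 < k)]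
      have hc : (min ((done.length + rest.length : Nat) - 1 : Int) ((done.length : Int) + k)).toNat
          + 1 - done.length = w.length := by
        rw [hwlen]; omega
      have hidx : pvFindMax (done ++ rest) done.length
          (List.range' done.length ((min ((done.length + rest.length : Nat) - 1 : Int)
            ((done.length : Int) + k)).toNat + 1 - done.length)) = done.length + a := by
        rw [hc, List.range'_eq_map_range]
        have hs := pvFindMax_shift done rest (List.range w.length) 0
        rw [Nat.add_zero] at hs
        rw [hs, hadef]
        congr 1
        rw [pvFindMax_take rest (k.toNat + 1) (List.range w.length) 0
          (fun i hi => by have := List.mem_range.mp hi; omega) (by omega), ← hw]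
      rw [hidx]
      have hb := pvBubble_spec done a rest k hblt
      rw [hb]
      -- fold the new prefix and apply the induction hypothesis
      have e1 : done ++ rest.getD a 0 :: rest.eraseIdx a =
          (done ++ [rest.getD a 0]) ++ rest.eraseIdx a := by simp
      have ihh := ih (rest.eraseIdx a) (done ++ [rest.getD a 0]) (k - (a : Int)) (by omega)
      have e2 : (done ++ [rest.getD a 0]).length = done.length + 1 := by simp
      rw [e2, herlen] at ihh
      rw [show done.length + 1 + (rest.length - 1) = done.length + rest.length from by omega] at ihh
      rw [e1, ihh]
      -- unfold one step of B's loop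
      rw [pvAltGo_step _ _ _ ⟨hrest, hk⟩, ← hw, hindex]
      simp only [Option.getD_some]
      rw [pvAltGo_acc n (rest.eraseIdx a) ([] ++ [rest.getD a 0]) (k - (a : Int)) (by omega)]
      simp

-- ===== VERDICT (by name: the statement is the Claim_ definition above) =====
theorem find_largest_order_spec : Claim_equal_find_largest_order := by
  intro nums swap_limit _
  unfold Spec_find_largest_order find_largest_order find_largest_order_alt
  have := pvMain nums.length nums [] swap_limit le_rfl
  simpa using this
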